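-- pv_equiv track=rewrite | github.com/sagemath/sage-archive-2023-02-01 | src/sage/combinat/fast_vector_partitions.py | vector_halve
-- ===== SOURCE A (Python) =====
-- def vector_halve(v):
--     r"""
--     Internal part of the current implementation of fast_vector_partitions().
--
--     INPUT:
--             - ``v`` -- A list of non-negative integers, understood as a vector.
--
--     OUTPUT:
--             A list, understood as the integer vector halfway down the list of
--             lexicographically ordered vectors between between ``v`` and zero.
--
--     NOTE:
--             For vectors, ``v=a+b`` implies ``v=b+a``, which means that a
--             downward search for such splittings, starting with ``v=v+0``, need
--             only look as far as some "v/2", given precise meaning here.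
--
--             A similar logic is to stop the search for divisors of ``N`` at
--             ``sqrt(N)``, halving the exponents in the prime decompostion.
--             However, here "v/2" does not mean halving each coordinate.
--     """
--     i = 0
--     result = []
--     for vv in v:
--         result += [vv // 2]
--         i += 1
--         if vv % 2 != 0:
--             return result + v[i:] # the less significant part is just copied
--     return result
-- ===== SOURCE B (Python) =====
-- def vector_halve(v):
--     # Locate the first odd coordinate, then build the answer in one go:
--     # halve the prefix through that coordinate, copy the tail verbatim.
--     k = next((i for i, x in enumerate(v) if x % 2), len(v))
--     return [x // 2 for x in v[:k + 1]] + v[k + 1:]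
-- ===== Notes on version B (the rewrite author's own statement) =====
-- stated objective: alternative
-- what changed: Replaces the incremental early-return accumulation loop by a locate-then-construct decomposition: find the first odd index k, then assemble [x//2 for prefix through k] + tail copied verbatim.
import Mathlib
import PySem

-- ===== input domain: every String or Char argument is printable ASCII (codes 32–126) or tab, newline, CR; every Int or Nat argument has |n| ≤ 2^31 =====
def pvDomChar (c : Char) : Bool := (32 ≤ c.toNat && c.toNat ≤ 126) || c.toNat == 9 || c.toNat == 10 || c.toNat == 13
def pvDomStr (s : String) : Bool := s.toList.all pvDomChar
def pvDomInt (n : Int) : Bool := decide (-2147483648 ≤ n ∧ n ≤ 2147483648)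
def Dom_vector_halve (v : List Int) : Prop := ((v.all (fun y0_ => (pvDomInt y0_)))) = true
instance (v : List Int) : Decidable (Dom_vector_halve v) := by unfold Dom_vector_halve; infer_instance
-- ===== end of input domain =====

-- B assembles the result as halved-prefix ++ verbatim tail after locating the first odd
-- coordinate, instead of A's incremental early-return accumulation loop. Same values, same cost.

-- ===== PORT A =====
-- A's loop: accumulator 'result', counter 'i', early return on the first odd coordinate.
def vhGo (orig : List Int) : List Int → Nat → List Int → List Int
  | [], _, result => result
  | vv :: rest, i, result =>
    let result' := result ++ [PySem.Int.floordiv vv 2]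
    let i' := i + 1
    if PySem.Int.mod vv 2 ≠ 0 then
      result' ++ PySem.List.slice orig (some (i' : Int)) none
    else
      vhGo orig rest i' result'

def vector_halve (v : List Int) : List Int := vhGo v v 0 []

-- ===== PORT B =====
-- index of the first odd coordinate (= length if none): next((i for i,x in enumerate(v) if x%2), len(v))
def firstOdd : List Int → Nat
  | [] => 0
  | x :: xs => if PySem.Int.mod x 2 ≠ 0 then 0 else firstOdd xs + 1

def vector_halve_alt (v : List Int) : List Int :=
  let k := firstOdd v
  (v.take (k + 1)).map (fun x => PySem.Int.floordiv x 2) ++ v.drop (k + 1)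

-- ===== PRECONDITION & SPEC =====
def Spec_vector_halve (v : List Int) (out : List Int) : Prop := out = vector_halve_alt v
instance (v : List Int) (out : List Int) : Decidable (Spec_vector_halve v out) := by unfold Spec_vector_halve; infer_instance

-- ===== CLAIM (what is proved, stated in full; the proofs are below) =====
def Claim_equal_vector_halve : Prop := ∀ (v : List Int), Dom_vector_halve v → Spec_vector_halve v (vector_halve v)

-- ===== LEMMAS AND PROOFS =====
lemma vhGo_eq (rest : List Int) : ∀ (pre : List Int),
    vhGo (pre ++ rest) rest pre.length (pre.map (fun x => PySem.Int.floordiv x 2)) =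
      pre.map (fun x => PySem.Int.floordiv x 2) ++
        ((rest.take (firstOdd rest + 1)).map (fun x => PySem.Int.floordiv x 2) ++
          rest.drop (firstOdd rest + 1)) := by
  induction rest with
  | nil => intro pre; simp [vhGo]
  | cons vv rest' ih =>
    intro pre
    by_cases h : PySem.Int.mod vv 2 ≠ 0
    · simp only [vhGo, firstOdd, if_pos h]
      rw [PySem.List.slice_from_natCast]
      rw [show pre ++ vv :: rest' = (pre ++ [vv]) ++ rest' by simp,
          show pre.length + 1 = (pre ++ [vv]).length by simp]
      simp
    · simp only [vhGo, firstOdd, if_neg h]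
      have h1 : pre.map (fun x => PySem.Int.floordiv x 2) ++ [PySem.Int.floordiv vv 2] =
          (pre ++ [vv]).map (fun x => PySem.Int.floordiv x 2) := by simp
      have h2 : pre ++ vv :: rest' = (pre ++ [vv]) ++ rest' := by simp
      have h3 : pre.length + 1 = (pre ++ [vv]).length := by simp
      rw [h1, h2, h3, ih (pre ++ [vv])]
      simp [List.take_succ_cons, List.drop_succ_cons]

-- ===== VERDICT (by name: the statement is the Claim_ definition above) =====
theorem vector_halve_spec : Claim_equal_vector_halve := by
  intro v _
  unfold Spec_vector_halve vector_halve vector_halve_alt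
  have := vhGo_eq v []
  simpa using this
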